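-- pv_equiv track=rewrite | github.com/IZKF-Genomics/UKA_GF_BRS | hooks/nfcore_cutandrun_draft_samplesheet.py | _detect_control_group
-- ===== SOURCE A (Python) =====
-- from typing import Dict, List, Tuple
--
-- def _detect_control_group(groups: List[str]) -> str | None:
--     for g in groups:
--         if g.lower() == "igg_ctrl":
--             return g
--     for g in groups:
--         gl = g.lower()
--         if "igg" in gl or "control" in gl:
--             return g
--     return None
-- ===== SOURCE B (Python) =====
-- def _detect_control_group(groups):
--     fallback = None
--     for g in groups:
--         gl = g.lower()
--         if gl == "igg_ctrl":
--             return g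
--         if fallback is None and ("igg" in gl or "control" in gl):
--             fallback = g
--     return fallback
-- ===== Notes on version B (the rewrite author's own statement) =====
-- stated objective: simpler
-- what changed: Replaced A's two sequential scans (exact-match pass, then substring pass) by a single scan that returns on an exact match and remembers the first substring match as a fallback.
import Mathlib
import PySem

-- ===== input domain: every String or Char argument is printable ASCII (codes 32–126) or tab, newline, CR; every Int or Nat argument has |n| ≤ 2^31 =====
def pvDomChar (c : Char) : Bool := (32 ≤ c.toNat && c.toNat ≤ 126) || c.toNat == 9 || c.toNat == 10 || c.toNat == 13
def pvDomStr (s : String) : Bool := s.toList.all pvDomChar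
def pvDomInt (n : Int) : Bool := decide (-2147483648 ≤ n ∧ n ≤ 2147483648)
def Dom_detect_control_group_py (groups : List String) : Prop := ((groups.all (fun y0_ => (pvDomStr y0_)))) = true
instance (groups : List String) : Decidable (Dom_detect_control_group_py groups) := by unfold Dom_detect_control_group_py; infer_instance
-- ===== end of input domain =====

-- B replaces A's two sequential scans by a single scan with a stored fallback (objective: simpler).

-- ===== PORT A =====
-- first loop: return the first g with g.lower() == "igg_ctrl"
def dcgExactLoop : List String → Option String
  | [] => none
  | g :: t => if PySem.Str.lower g == "igg_ctrl" then some g else dcgExactLoop t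

-- second loop: return the first g whose lowercase contains "igg" or "control"
def dcgSubLoop : List String → Option String
  | [] => none
  | g :: t =>
    let gl := PySem.Str.lower g
    if PySem.Str.isIn "igg" gl || PySem.Str.isIn "control" gl then some g else dcgSubLoop t

def detect_control_group_py (groups : List String) : Option String :=
  match dcgExactLoop groups with
  | some g => some g
  | none =>
    match dcgSubLoop groups with
    | some g => some g
    | none => none

-- ===== PORT B =====
-- single scan carrying the fallback candidate
def dcgScan : List String → Option String → Option String
  | [], fallback => fallback
  | g :: t, fallback =>
    let gl := PySem.Str.lower g
    if gl == "igg_ctrl" then some g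
    else
      dcgScan t
        (if fallback.isNone && (PySem.Str.isIn "igg" gl || PySem.Str.isIn "control" gl)
         then some g else fallback)

def detect_control_group_py_alt (groups : List String) : Option String :=
  dcgScan groups none

-- ===== PRECONDITION & SPEC =====
def Spec_detect_control_group_py (groups : List String) (out : Option String) : Prop := out = detect_control_group_py_alt groups
instance (groups : List String) (out : Option String) : Decidable (Spec_detect_control_group_py groups out) := by unfold Spec_detect_control_group_py; infer_instance

-- ===== CLAIM (what is proved, stated in full; the proofs are below) =====
def Claim_equal_detect_control_group_py : Prop := ∀ (groups : List String), Dom_detect_control_group_py groups → Spec_detect_control_group_py groups (detect_control_group_py groups)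

-- ===== LEMMAS AND PROOFS =====
theorem dcgScan_eq (groups : List String) (fb : Option String) :
    dcgScan groups fb =
      match dcgExactLoop groups with
      | some g => some g
      | none => match fb with
        | some f => some f
        | none => dcgSubLoop groups := by
  induction groups generalizing fb with
  | nil => cases fb <;> rfl
  | cons g t ih =>
    simp only [dcgScan, dcgExactLoop, dcgSubLoop]
    by_cases hx : (PySem.Str.lower g == "igg_ctrl") = true
    · simp [hx]
    · simp only [hx, if_false, Bool.false_eq_true, ih]
      cases hE : dcgExactLoop t
      · cases fb with
        | some f => simp
        | none => split_ifs <;> simp_all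
      · cases fb <;> simp

-- ===== VERDICT (by name: the statement is the Claim_ definition above) =====
theorem detect_control_group_py_spec : Claim_equal_detect_control_group_py := by
  intro groups _
  unfold Spec_detect_control_group_py detect_control_group_py detect_control_group_py_alt
  rw [dcgScan_eq]
  cases dcgExactLoop groups <;> cases hS : dcgSubLoop groups <;> simp
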